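-- pv_equiv track=rewrite | github.com/kishhcodes/cloudsec-agent | src/aws_mcp/tools.py | is_pipe_command
-- ===== SOURCE A (Python) =====
-- def is_pipe_command(command: str) -> bool:
--     """Check if a command contains a pipe operator.
--
--     Args:
--         command: The command to check
--
--     Returns:
--         True if the command contains a pipe operator, False otherwise
--     """
--     # Check for pipe operator that's not inside quotes
--     in_single_quote = False
--     in_double_quote = False
--     escaped = False
--
--     for char in command:
--         # Handle escape sequences
--         if char == "\\" and not escaped:
--             escaped = True
--             continue
--
--         if not escaped:
--             if char == "'" and not in_double_quote:
--                 in_single_quote = not in_single_quote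
--             elif char == '"' and not in_single_quote:
--                 in_double_quote = not in_double_quote
--             elif char == "|" and not in_single_quote and not in_double_quote:
--                 return True
--
--         escaped = False
--
--     return False
-- ===== SOURCE B (Python) =====
-- def is_pipe_command(command: str) -> bool:
--     """Check if a command contains a pipe operator outside quotes (index-based scanner)."""
--     i = 0
--     n = len(command)
--     while i < n:
--         c = command[i]
--         if c == '\\':
--             i += 2
--             continue
--         if c == "'" or c == '"':
--             q = c
--             i += 1
--             while i < n:
--                 if command[i] == '\\':
--                     i += 2
--                 elif command[i] == q:
--                     i += 1
--                     break
--                 else: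
--                     i += 1
--             continue
--         if c == '|':
--             return True
--         i += 1
--     return False
-- ===== Notes on version B (the rewrite author's own statement) =====
-- stated objective: alternative
-- what changed: Replaces A's flat three-flag (in_single/in_double/escaped) state machine over the characters with an index-based scanner that skips escapes by jumping two positions and consumes each quoted region in a nested inner loop.
import Mathlib
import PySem

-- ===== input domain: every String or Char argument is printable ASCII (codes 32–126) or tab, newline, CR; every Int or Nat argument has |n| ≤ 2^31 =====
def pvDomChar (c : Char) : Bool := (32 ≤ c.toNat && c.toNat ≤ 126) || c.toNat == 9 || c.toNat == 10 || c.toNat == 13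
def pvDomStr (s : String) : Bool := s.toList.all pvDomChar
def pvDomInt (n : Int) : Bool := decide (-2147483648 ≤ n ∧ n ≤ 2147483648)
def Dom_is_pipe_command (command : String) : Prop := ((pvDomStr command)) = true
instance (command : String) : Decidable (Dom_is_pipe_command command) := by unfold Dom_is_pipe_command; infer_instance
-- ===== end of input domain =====

-- B replaces A's flat three-flag state machine by an index-style scanner with nested
-- quote-region skipping loops (objective: idiomatic/alternative decomposition; same O(n) cost).

-- ===== PORT A =====
-- A's for-loop over the characters with state (in_single_quote, in_double_quote, escaped)
def pvLoopA : List Char → Bool → Bool → Bool → Bool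
  | [], _, _, _ => false
  | c :: rest, sq, dq, esc =>
    if c = '\\' && !esc then pvLoopA rest sq dq true
    else if !esc then
      if c = '\'' && !dq then pvLoopA rest (!sq) dq false
      else if c = '"' && !sq then pvLoopA rest sq (!dq) false
      else if c = '|' && !sq && !dq then true
      else pvLoopA rest sq dq false
    else pvLoopA rest sq dq false

def is_pipe_command (command : String) : Bool :=
  pvLoopA command.toList false false false

-- ===== PORT B =====
-- B's outer scanner; advancing i by 2 over a backslash = dropping one extra character
mutual
def pvScanB : List Char → Bool
  | [] => false
  | c :: rest =>
    if c = '\\' then pvScanB (rest.drop 1)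
    else if c = '\'' || c = '"' then pvInQ c rest
    else if c = '|' then true
    else pvScanB rest
termination_by l => l.length
decreasing_by all_goals simp
-- B's inner loop consuming a quoted region until the matching unescaped quote q
def pvInQ : Char → List Char → Bool
  | _, [] => false
  | q, c :: rest =>
    if c = '\\' then pvInQ q (rest.drop 1)
    else if c = q then pvScanB rest
    else pvInQ q rest
termination_by _ l => l.length
decreasing_by all_goals simp
end

def is_pipe_command_alt (command : String) : Bool :=
  pvScanB command.toList

-- ===== PRECONDITION & SPEC =====
def Spec_is_pipe_command (command : String) (out : Bool) : Prop := out = is_pipe_command_alt command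
instance (command : String) (out : Bool) : Decidable (Spec_is_pipe_command command out) := by unfold Spec_is_pipe_command; infer_instance

-- ===== CLAIM (what is proved, stated in full; the proofs are below) =====
def Claim_equal_is_pipe_command : Prop := ∀ (command : String), Dom_is_pipe_command command → Spec_is_pipe_command command (is_pipe_command command)

-- ===== LEMMAS AND PROOFS =====

-- In A, the escaped state just consumes the next character (in any quote state)
lemma pvLoopA_esc (sq dq : Bool) (rest : List Char) :
    pvLoopA rest sq dq true = pvLoopA (rest.drop 1) sq dq false := by
  cases rest with
  | nil => simp [pvLoopA]
  | cons c r => simp [pvLoopA]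

-- Core invariant: A's three quote states correspond to B's outer scan / quote loops
lemma pv_equiv : ∀ n l, List.length l ≤ n →
    (pvLoopA l false false false = pvScanB l ∧
     pvLoopA l true false false = pvInQ '\'' l ∧
     pvLoopA l false true false = pvInQ '"' l) := by
  intro n
  induction n with
  | zero =>
    intro l h
    have : l = [] := List.eq_nil_of_length_eq_zero (Nat.le_zero.mp h)
    subst this
    simp [pvLoopA, pvScanB, pvInQ]
  | succ n ih =>
    intro l h
    cases l with
    | nil => simp [pvLoopA, pvScanB, pvInQ]
    | cons c rest =>
      have hr : rest.length ≤ n := by simpa using Nat.succ_le_succ_iff.mp h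
      have hd : rest.tail.length ≤ n := by
        simp [List.length_tail]; omega
      by_cases h1 : c = '\\'
      · subst h1
        simp [pvLoopA, pvScanB, pvInQ, pvLoopA_esc, List.drop_one]
        exact ⟨(ih _ hd).1, (ih _ hd).2.1, (ih _ hd).2.2⟩
      · by_cases h2 : c = '\''
        · subst h2
          simp [pvLoopA, pvScanB, pvInQ]
          exact ⟨(ih _ hr).2.1, (ih _ hr).1, (ih _ hr).2.2⟩
        · by_cases h3 : c = '"'
          · subst h3
            simp [pvLoopA, pvScanB, pvInQ]
            exact ⟨(ih _ hr).2.2, (ih _ hr).2.1, (ih _ hr).1⟩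
          · by_cases h4 : c = '|'
            · subst h4
              simp [pvLoopA, pvScanB, pvInQ]
              exact ⟨(ih _ hr).2.1, (ih _ hr).2.2⟩
            · simp [pvLoopA, pvScanB, pvInQ, h1, h2, h3, h4]
              exact ⟨(ih _ hr).1, (ih _ hr).2.1, (ih _ hr).2.2⟩

-- ===== VERDICT (by name: the statement is the Claim_ definition above) =====
theorem is_pipe_command_spec : Claim_equal_is_pipe_command := by
  intro command _
  unfold Spec_is_pipe_command is_pipe_command is_pipe_command_alt
  exact (pv_equiv command.toList.length command.toList le_rfl).1
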